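-- pv_equiv track=rewrite | github.com/giaabaoo/TrackAndStop_CausalDiscovery_FailureModes | run_table2_sep.py | generate_strongly_separating_sets
-- ===== SOURCE A (Python) =====
-- import math
--
-- def generate_strongly_separating_sets(n_nodes):
--     m = math.ceil(math.log2(n_nodes)) if n_nodes > 1 else 1
--     sets = []
--     for bit in range(m):
--         S = [node for node in range(n_nodes) if ((node >> bit) & 1)]
--         if S:
--             sets.append(S)
--     return sets
-- ===== SOURCE B (Python) =====
-- import math
--
-- def generate_strongly_separating_sets(n_nodes):
--     m = math.ceil(math.log2(n_nodes)) if n_nodes > 1 else 1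
--     buckets = [[] for _ in range(m)]
--     for node in range(n_nodes):
--         x = node
--         bit = 0
--         while x:
--             if x & 1:
--                 buckets[bit].append(node)
--             x >>= 1
--             bit += 1
--     return [b for b in buckets if b]
-- ===== Notes on version B (the rewrite author's own statement) =====
-- stated objective: alternative
-- what changed: Instead of one filter pass over range(n_nodes) per bit (m scans), B makes a single pass over the nodes and distributes each node into a bucket table by walking only its set bits with a while-loop, then keeps the non-empty buckets in bit order.
import Mathlib
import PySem

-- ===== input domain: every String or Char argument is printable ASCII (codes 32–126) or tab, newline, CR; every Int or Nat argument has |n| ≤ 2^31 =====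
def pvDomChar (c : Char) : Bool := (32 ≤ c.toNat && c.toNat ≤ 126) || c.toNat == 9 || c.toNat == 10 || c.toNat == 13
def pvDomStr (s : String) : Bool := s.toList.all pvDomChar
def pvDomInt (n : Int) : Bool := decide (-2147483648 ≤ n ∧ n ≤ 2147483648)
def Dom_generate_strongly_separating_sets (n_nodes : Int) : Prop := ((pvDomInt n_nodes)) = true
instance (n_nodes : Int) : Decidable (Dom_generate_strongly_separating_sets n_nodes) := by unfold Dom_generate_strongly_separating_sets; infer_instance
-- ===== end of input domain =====

-- B replaces A's m filter-passes over range(n_nodes) by one pass that walks each node's set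
-- bits into a bucket table (objective: alternative decomposition, same asymptotic cost).

-- ===== PORT A =====
-- math.ceil(math.log2 n) for 1 < n is exactly Nat.clog 2 n (math.log2 is a correctly rounded
-- double, exact under ceil for all n in Dom, |n| ≤ 2^31).
def generate_strongly_separating_sets (n_nodes : Int) : List (List Int) :=
  let m : Nat := if 1 < n_nodes then Nat.clog 2 n_nodes.toNat else 1
  (List.range m).foldl
    (fun sets bit =>
      let S := (PySem.List.pyRange 0 n_nodes 1).filter
        (fun node => PySem.Int.band (node >>> bit) 1 != 0)
      if S ≠ [] then sets ++ [S] else sets)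
    []

-- ===== PORT B =====
-- the 'while x:' loop of Source B: x starts at node ≥ 0, so the loop test 'x' is exactly 'x > 0'
-- on every reachable state (a negative x never occurs).
def pvAltWhile (bs : List (List Int)) (node : Int) (x : Int) (bit : Nat) : List (List Int) :=
  if h : x ≤ 0 then bs
  else pvAltWhile
    (if PySem.Int.band x 1 != 0 then bs.set bit (bs.getD bit [] ++ [node]) else bs)
    node (x >>> (1:Nat)) (bit + 1)
termination_by x.toNat
decreasing_by
  simp only [Int.shiftRight_eq_div_pow]
  omega

def generate_strongly_separating_sets_alt (n_nodes : Int) : List (List Int) :=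
  let m : Nat := if 1 < n_nodes then Nat.clog 2 n_nodes.toNat else 1
  let buckets := (PySem.List.pyRange 0 n_nodes 1).foldl
    (fun bs node => pvAltWhile bs node node 0)
    (List.replicate m [])
  buckets.filter (fun b => b != [])

-- ===== PRECONDITION & SPEC =====
def Spec_generate_strongly_separating_sets (n_nodes : Int) (out : List (List Int)) : Prop := out = generate_strongly_separating_sets_alt n_nodes
instance (n_nodes : Int) (out : List (List Int)) : Decidable (Spec_generate_strongly_separating_sets n_nodes out) := by unfold Spec_generate_strongly_separating_sets; infer_instance

-- ===== CLAIM (what is proved, stated in full; the proofs are below) =====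
def Claim_equal_generate_strongly_separating_sets : Prop := ∀ (n_nodes : Int), Dom_generate_strongly_separating_sets n_nodes → Spec_generate_strongly_separating_sets n_nodes (generate_strongly_separating_sets n_nodes)

-- ===== LEMMAS AND PROOFS =====

-- A's loop shape: append the per-bit filter when non-empty = filter of the list of per-bit filters
theorem pv_foldl_if_append (F : Nat → List Int) :
    ∀ (bits : List Nat) (acc : List (List Int)),
      bits.foldl (fun sets bit => if F bit ≠ [] then sets ++ [F bit] else sets) acc
        = acc ++ (bits.map F).filter (fun b => b != []) := by
  intro bits
  induction bits with
  | nil => intro acc; simp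
  | cons b rest ih =>
    intro acc
    rw [List.foldl_cons]
    by_cases hb : F b = []
    · rw [if_neg (by simp [hb]), ih, List.map_cons, List.filter_cons]
      simp [hb]
    · rw [if_pos hb, ih, List.map_cons, List.filter_cons]
      simp [hb]

theorem pv_cast_shiftRight (k b : Nat) : ((k:Int) >>> b) = ((k >>> b : Nat) : Int) := by
  simp [Int.shiftRight_eq_div_pow, Nat.shiftRight_eq_div_pow]

theorem pv_band_one (k : Nat) : (PySem.Int.band (k:Int) 1 != 0) = k.testBit 0 := by
  have h : PySem.Int.band (k:Int) 1 = ((k &&& 1 : Nat) : Int) := by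
    simpa using PySem.Int.band_natCast k 1
  rw [h]; simp [Nat.testBit, Nat.and_one_is_mod]
  rcases Nat.mod_two_eq_zero_or_one k with h2 | h2 <;> simp [h2] <;> omega

theorem pvAltWhile_zero (bs : List (List Int)) (node : Int) (bit : Nat) :
    pvAltWhile bs node ((0:Nat):Int) bit = bs := by
  rw [pvAltWhile]; simp

theorem pvAltWhile_step (bs : List (List Int)) (node : Int) (k : Nat) (hk : 0 < k) (bit : Nat) :
    pvAltWhile bs node (k:Int) bit
      = pvAltWhile (if k.testBit 0 then bs.set bit (bs.getD bit [] ++ [node]) else bs)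
          node ((k >>> 1 : Nat) : Int) (bit + 1) := by
  rw [pvAltWhile, dif_neg (by omega : ¬ ((k:Int) ≤ 0)), pv_cast_shiftRight, pv_band_one]

theorem pv_half_lt (k : Nat) (hk : 0 < k) : k >>> 1 < k := by
  simp [Nat.shiftRight_eq_div_pow]; omega

theorem pvAltWhile_length (node : Int) :
    ∀ (k : Nat) (bs : List (List Int)) (bit : Nat),
      (pvAltWhile bs node (k:Int) bit).length = bs.length := by
  intro k
  induction k using Nat.strong_induction_on with
  | _ k ih =>
    intro bs bit
    by_cases hk0 : k = 0
    · subst hk0; rw [pvAltWhile_zero]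
    · rw [pvAltWhile_step _ _ _ (by omega) _, ih (k >>> 1) (pv_half_lt k (by omega))]
      split <;> simp

theorem pvAltWhile_getD (node : Int) :
    ∀ (k : Nat) (bs : List (List Int)) (bit j : Nat),
      (pvAltWhile bs node (k:Int) bit).getD j []
        = if bit ≤ j ∧ k.testBit (j - bit) ∧ j < bs.length
          then bs.getD j [] ++ [node] else bs.getD j [] := by
  intro k
  induction k using Nat.strong_induction_on with
  | _ k ih =>
    intro bs bit j
    by_cases hk0 : k = 0
    · subst hk0; rw [pvAltWhile_zero]; simp
    · rw [pvAltWhile_step _ _ _ (by omega) _, ih (k >>> 1) (pv_half_lt k (by omega))]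
      set bs' := if k.testBit 0 then bs.set bit (bs.getD bit [] ++ [node]) else bs with hbs'
      have hlen' : bs'.length = bs.length := by rw [hbs']; split <;> simp
      have htb : ∀ i, (k >>> 1).testBit i = k.testBit (1 + i) := by
        intro i; rw [Nat.testBit_shiftRight]
      by_cases hj : bit = j
      · subst hj
        rw [if_neg (fun h => absurd h.1 (by omega))]
        by_cases hb : k.testBit 0
        · rw [hbs', if_pos hb]
          by_cases hlt : bit < bs.length
          · rw [if_pos ⟨by omega, by simpa using hb, hlt⟩]
            simp [List.getD_eq_getElem?_getD, hlt]
          · have hge : bs.length ≤ bit := by omega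
            rw [if_neg (fun h => absurd h.2.2 (by omega))]
            simp [List.getD_eq_getElem?_getD, hlt]
        · rw [hbs', if_neg hb,
            if_neg (fun h => absurd h.2.1 (by simpa using hb))]
      · have hgetD : bs'.getD j [] = bs.getD j [] := by
          rw [hbs']; split
          · simp [List.getD_eq_getElem?_getD, List.getElem?_set_ne hj]
          · rfl
        have hC : (bit + 1 ≤ j ∧ (k >>> 1).testBit (j - (bit + 1)) ∧ j < bs.length)
            ↔ (bit ≤ j ∧ k.testBit (j - bit) ∧ j < bs.length) := by
          constructor
          · rintro ⟨h1, h2, h3⟩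
            refine ⟨by omega, ?_, h3⟩
            rw [htb, show 1 + (j - (bit + 1)) = j - bit from by omega] at h2
            exact h2
          · rintro ⟨h1, h2, h3⟩
            refine ⟨by omega, ?_, h3⟩
            rw [htb, show 1 + (j - (bit + 1)) = j - bit from by omega]
            exact h2
        simp only [hgetD, hlen']
        exact if_congr hC rfl rfl

theorem pvAltWhile_map (node : Int) (k m : Nat) (g : Nat → List Int) :
    pvAltWhile ((List.range m).map g) node (k:Int) 0
      = (List.range m).map (fun b => if k.testBit b then g b ++ [node] else g b) := by
  have hlen : (pvAltWhile ((List.range m).map g) node (k:Int) 0).length = m := by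
    rw [pvAltWhile_length]; simp
  apply List.ext_getElem (by simp [hlen])
  intro i h1 h2
  have hi : i < m := by omega
  have hgd : ∀ (xs : List (List Int)) (h : i < xs.length), xs[i] = xs.getD i [] := by
    intro xs h; simp [List.getD_eq_getElem?_getD, List.getElem?_eq_getElem h]
  rw [hgd _ h1, hgd _ h2, pvAltWhile_getD]
  have hmg : ((List.range m).map g).getD i [] = g i := by
    simp [List.getD_eq_getElem?_getD, List.getElem?_map, List.getElem?_range hi]
  have hmg2 : ((List.range m).map fun b => if k.testBit b then g b ++ [node] else g b).getD i []
      = if k.testBit i then g i ++ [node] else g i := by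
    simp [List.getD_eq_getElem?_getD, List.getElem?_map, List.getElem?_range hi]
  rw [hmg2]
  simp only [Nat.zero_le, true_and, Nat.sub_zero, List.length_map, List.length_range, hi, and_true, hmg]

theorem pv_outer (m : Nat) :
    ∀ (ns : List Int), (∀ x ∈ ns, 0 ≤ x) → ∀ (g : Nat → List Int),
      ns.foldl (fun bs node => pvAltWhile bs node node 0) ((List.range m).map g)
        = (List.range m).map (fun b => g b ++ ns.filter (fun node => node.toNat.testBit b)) := by
  intro ns
  induction ns with
  | nil => intro _ g; simp
  | cons n rest ih =>
    intro hnn g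
    have hn : (0:Int) ≤ n := hnn n (by simp)
    simp only [List.foldl_cons]
    have hcast : n = ((n.toNat : Nat) : Int) := (Int.toNat_of_nonneg hn).symm
    rw [show pvAltWhile ((List.range m).map g) n n 0
        = pvAltWhile ((List.range m).map g) n ((n.toNat : Nat) : Int) 0 by rw [← hcast]]
    rw [pvAltWhile_map]
    rw [ih (fun x hx => hnn x (by simp [hx])) _]
    apply List.map_congr_left
    intro b _
    by_cases hb : n.toNat.testBit b <;> simp [hb]

theorem pv_predA_eq (bit : Nat) (node : Int) (hn : 0 ≤ node) :
    (PySem.Int.band (node >>> bit) 1 != 0) = node.toNat.testBit bit := by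
  have hcast : node = ((node.toNat : Nat) : Int) := (Int.toNat_of_nonneg hn).symm
  rw [hcast, pv_cast_shiftRight, pv_band_one, Nat.testBit_shiftRight, Nat.add_zero,
    Int.toNat_natCast]

-- ===== VERDICT (by name: the statement is the Claim_ definition above) =====
theorem generate_strongly_separating_sets_spec : Claim_equal_generate_strongly_separating_sets := by
  intro n _
  unfold Spec_generate_strongly_separating_sets
  unfold generate_strongly_separating_sets generate_strongly_separating_sets_alt
  simp only []
  set m : Nat := if 1 < n then Nat.clog 2 n.toNat else 1 with hm
  set ns : List Int := PySem.List.pyRange 0 n 1 with hns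
  have hnn : ∀ x ∈ ns, (0:Int) ≤ x := by
    intro x hx
    rw [hns] at hx
    have := (PySem.List.mem_pyRange_one (a := 0) (b := n) (x := x)).mp hx
    omega
  have hrep : (List.replicate m ([] : List Int)) = (List.range m).map (fun _ => []) := by
    simp [List.map_const']
  rw [pv_foldl_if_append (fun bit => ns.filter (fun node => PySem.Int.band (node >>> bit) 1 != 0))
      (List.range m) [], List.nil_append, hrep, pv_outer m ns hnn]
  congr 1
  apply List.map_congr_left
  intro b _
  rw [List.nil_append]
  apply List.filter_congr
  intro x hx
  exact pv_predA_eq b x (hnn x hx)
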